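-- pv_equiv track=rewrite | github.com/amoshaviv/flow-tester | agent/agent.py | prepareInitialActions
-- ===== SOURCE A (Python) =====
-- def prepareInitialActions(actions):
--     """
--     Prepare initial actions by filtering out unwanted actions and adding wait actions between each action.
--
--     Args:
--         actions (list): List of action dictionaries
--
--     Returns:
--         list: Filtered actions with wait actions added between them
--     """
--     action_types_to_filter = ["done"]
--     wait_duration = 1
--
--     if not actions:
--         return []
--
--     # Filter out unwanted actions
--     filtered_actions = []
--     for action in actions:
--         # Check if this action should be filtered out
--         should_filter = False
--         for action_key in action.keys():
--             if action_key in action_types_to_filter: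
--                 should_filter = True
--                 break
--
--         if not should_filter:
--             filtered_actions.append(action)
--
--     # Add wait actions between each action
--     prepared_actions = []
--     for i, action in enumerate(filtered_actions):
--         prepared_actions.append(action)
--
--         # Add wait action after each action except the last one
--         if i < len(filtered_actions) - 1:
--             wait_action = {
--                 "wait": {
--                     "seconds": wait_duration
--                 },
--                 "interacted_element": None
--             }
--             prepared_actions.append(wait_action)
--
--     return prepared_actions
-- ===== SOURCE B (Python) =====
-- def prepareInitialActions(actions):
--     # Single reversed pass: walk actions back-to-front, skip "done" actions,
--     # append a fresh wait dict before each action except the (reversed-)first,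
--     # then reverse once at the end.
--     result = []
--     for action in reversed(actions):
--         if "done" in action:
--             continue
--         if result:
--             result.append({"wait": {"seconds": 1}, "interacted_element": None})
--         result.append(action)
--     result.reverse()
--     return result
-- ===== Notes on version B (the rewrite author's own statement) =====
-- stated objective: simpler
-- what changed: Replaces A's empty-list guard, break-flag filter pass and a second enumerate/len-indexed interleave pass by one reversed-order pass that skips 'done' actions and decides wait insertion from accumulator emptiness, reversing once at the end.
import Mathlib
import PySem

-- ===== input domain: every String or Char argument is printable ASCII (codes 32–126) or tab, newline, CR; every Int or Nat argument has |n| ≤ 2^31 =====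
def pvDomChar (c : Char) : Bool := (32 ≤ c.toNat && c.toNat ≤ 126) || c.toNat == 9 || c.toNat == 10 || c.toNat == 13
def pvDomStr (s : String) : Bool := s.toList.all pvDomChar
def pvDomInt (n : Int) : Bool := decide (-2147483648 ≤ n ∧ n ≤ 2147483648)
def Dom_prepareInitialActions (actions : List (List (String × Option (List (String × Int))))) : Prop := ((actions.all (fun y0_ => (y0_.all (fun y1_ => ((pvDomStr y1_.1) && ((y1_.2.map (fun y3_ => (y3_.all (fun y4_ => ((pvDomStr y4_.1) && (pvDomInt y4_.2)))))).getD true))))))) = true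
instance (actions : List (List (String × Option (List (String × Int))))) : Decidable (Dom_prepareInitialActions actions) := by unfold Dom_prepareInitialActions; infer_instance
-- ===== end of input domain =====

-- B replaces A's guard + two staged passes (break-flag filter, indexed interleave) by one reversed-order pass with an accumulator-emptiness test (objective: simpler).


-- ===== PORT A =====
def pvWait : List (String × Option (List (String × Int))) :=
  [("wait", some [("seconds", (1 : Int))]), ("interacted_element", none)]

-- literal transliteration of A: empty guard, break-flag filter loop (the broken
-- scan over keys is the List.any of membership in ["done"]), then an indexed
-- interleave loop carrying (i, prepared_actions)
def prepareInitialActions (actions : List (List (String × Option (List (String × Int))))) : List (List (String × Option (List (String × Int)))) :=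
  if actions = [] then []
  else
    let filtered_actions := actions.foldl (fun fa action =>
      let should_filter := action.any (fun kv => ["done"].contains kv.1)
      if !should_filter then fa ++ [action] else fa) []
    let st := filtered_actions.foldl (fun (st : Int × List (List (String × Option (List (String × Int))))) action =>
      let pa := st.2 ++ [action]
      let pa := if st.1 < (filtered_actions.length : Int) - 1 then pa ++ [pvWait] else pa
      (st.1 + 1, pa)) ((0 : Int), [])
    st.2

-- ===== PORT B =====
-- transliteration of B: one pass over reversed(actions) — skip "done" actions,
-- append a wait before the action when the accumulator is non-empty — then reverse
def prepareInitialActions_alt (actions : List (List (String × Option (List (String × Int))))) : List (List (String × Option (List (String × Int)))) :=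
  let result := actions.reverse.foldl (fun res action =>
    if action.any (fun kv => kv.1 == "done") then res
    else
      let res := if res = [] then res else res ++ [pvWait]
      res ++ [action]) []
  result.reverse

-- ===== PRECONDITION & SPEC =====
def Spec_prepareInitialActions (actions : List (List (String × Option (List (String × Int))))) (out : List (List (String × Option (List (String × Int))))) : Prop := out = prepareInitialActions_alt actions
instance (actions : List (List (String × Option (List (String × Int))))) (out : List (List (String × Option (List (String × Int))))) : Decidable (Spec_prepareInitialActions actions out) := by unfold Spec_prepareInitialActions; infer_instance

-- ===== CLAIM (what is proved, stated in full; the proofs are below) =====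
def Claim_equal_prepareInitialActions : Prop := ∀ (actions : List (List (String × Option (List (String × Int))))), Dom_prepareInitialActions actions → Spec_prepareInitialActions actions (prepareInitialActions actions)

-- ===== LEMMAS AND PROOFS =====

-- 'join-then-trim' normal form both ports are reduced to
def pvF (l : List (List (String × Option (List (String × Int))))) : List (List (String × Option (List (String × Int)))) :=
  if l.flatMap (fun a => [a, pvWait]) = [] then l.flatMap (fun a => [a, pvWait])
  else (l.flatMap (fun a => [a, pvWait])).dropLast

def pvP (a : List (String × Option (List (String × Int)))) : Bool := a.all (fun kv => kv.1 != "done")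

theorem pvF_nil : pvF [] = [] := rfl

theorem pvF_single (a : List (String × Option (List (String × Int)))) : pvF [a] = [a] := rfl

theorem pvF_cons (a : List (String × Option (List (String × Int))))
    (l : List (List (String × Option (List (String × Int))))) (h : l ≠ []) :
    pvF (a :: l) = a :: pvWait :: pvF l := by
  have hg : l.flatMap (fun a => [a, pvWait]) ≠ [] := by
    cases l with
    | nil => exact absurd rfl h
    | cons b t => simp [List.flatMap_cons]
  simp [pvF, List.flatMap_cons, hg, List.dropLast_cons_of_ne_nil]

theorem pvF_ne_nil (l : List (List (String × Option (List (String × Int))))) (h : l ≠ []) :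
    pvF l ≠ [] := by
  cases l with
  | nil => exact absurd rfl h
  | cons a t =>
    rcases eq_or_ne t [] with ht | ht
    · subst ht; simp [pvF_single]
    · rw [pvF_cons a t ht]; simp

-- A's keep-condition (negated break-flag scan) equals the canonical predicate
theorem pv_pred_eq (a : List (String × Option (List (String × Int)))) :
    (!(a.any (fun kv => ["done"].contains kv.1))) = pvP a := by
  simp [pvP, List.any_eq_not_all_not, bne, beq_eq_decide]

-- B's skip-condition is the negation of the canonical predicate
theorem pv_pred_eq_B (a : List (String × Option (List (String × Int)))) :
    (!(a.any (fun kv => kv.1 == "done"))) = pvP a := by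
  simp [pvP, List.any_eq_not_all_not, bne, beq_eq_decide]

-- A's indexed interleave loop equals join-then-trim, for any fixed bound n = i + |l|
theorem pv_loopA (n : Int) :
    ∀ (l : List (List (String × Option (List (String × Int))))) (i : Int)
      (acc : List (List (String × Option (List (String × Int))))),
      i + l.length = n →
      (l.foldl (fun (st : Int × List (List (String × Option (List (String × Int))))) action =>
          (st.1 + 1, if st.1 < n - 1 then (st.2 ++ [action]) ++ [pvWait] else st.2 ++ [action]))
        (i, acc)).2
      = acc ++ pvF l := by
  intro l
  induction l with
  | nil => intro i acc _; simp [pvF_nil]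
  | cons a t ih =>
    intro i acc hn
    simp only [List.length_cons] at hn
    rcases eq_or_ne t [] with ht | ht
    · subst ht
      have hi : ¬ (i < n - 1) := by simp only [List.length_nil, Nat.zero_add, Nat.cast_one] at hn; omega
      simp [List.foldl_cons, hi, pvF_single]
    · have hi : i < n - 1 := by
        have hl : t.length ≠ 0 := fun h0 => ht (List.eq_nil_of_length_eq_zero h0)
        have : 1 ≤ (t.length : Int) := by exact_mod_cast Nat.pos_of_ne_zero hl
        omega
      have hrec := ih (i + 1) ((acc ++ [a]) ++ [pvWait]) (by omega)
      simp only [List.foldl_cons, hi, if_true]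
      rw [hrec, pvF_cons a t ht]
      simp

-- B's reversed-pass loop (as a foldr after List.foldl_reverse) builds the reverse of join-then-trim of the filtered list
theorem pv_loopB :
    ∀ (l : List (List (String × Option (List (String × Int))))),
      l.foldr (fun action res =>
        if action.any (fun kv => kv.1 == "done") then res
        else (if res = [] then res else res ++ [pvWait]) ++ [action]) []
      = (pvF (l.filter pvP)).reverse := by
  intro l
  induction l with
  | nil => simp [pvF_nil]
  | cons a t ih =>
    simp only [List.foldr_cons, ih, List.filter_cons]
    rcases hb : (a.any fun kv => kv.1 == "done") with _ | _
    · have hpa : pvP a = true := by rw [← pv_pred_eq_B, hb]; rfl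
      rcases eq_or_ne (t.filter pvP) [] with ht | ht
      · simp [hpa, ht, pvF_nil, pvF_single]
      · have h2 : (pvF (t.filter pvP)).reverse ≠ [] := by
          simpa using pvF_ne_nil _ ht
        rw [if_pos hpa, pvF_cons a _ ht]
        simp [h2]
    · have hpa : pvP a = false := by
        have := pv_pred_eq_B a
        rw [hb] at this
        simpa using this.symm
      simp [hpa]

-- ===== VERDICT (by name: the statement is the Claim_ definition above) =====
theorem prepareInitialActions_spec : Claim_equal_prepareInitialActions := by
  intro actions _
  unfold Spec_prepareInitialActions prepareInitialActions prepareInitialActions_alt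
  rw [List.foldl_reverse]
  have hB : (actions.foldr (fun action res =>
      if action.any (fun kv => kv.1 == "done") then res
      else (if res = [] then res else res ++ [pvWait]) ++ [action]) []).reverse
      = pvF (actions.filter pvP) := by
    rw [pv_loopB]; simp
  rcases eq_or_ne actions [] with h | h
  · subst h; rfl
  · simp only [h, if_false]
    have hfilt : actions.foldl (fun fa action =>
        let should_filter := action.any (fun kv => ["done"].contains kv.1)
        if !should_filter then fa ++ [action] else fa) []
        = actions.filter pvP := by
      rw [PySem.List.foldl_append_if_eq_filter]
      simp only [List.nil_append]
      exact List.filter_congr (fun a _ => pv_pred_eq a)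
    simp only [hfilt]
    rw [pv_loopA ((actions.filter pvP).length : Int) _ 0 [] (by simp), hB]
    simp
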